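-- pv_equiv track=rewrite | github.com/29REV/USB-Forensics-Tool-first | usb_device_manager.py | classify_device_type
-- ===== SOURCE A (Python) =====
-- from typing import List, Dict, Any, Optional
--
-- def classify_device_type(device_info: Dict[str, Any]) -> str:
--     """Classify USB device by type based on device info."""
--     name = str(device_info.get('name', '')).lower()
--     desc = str(device_info.get('description', '')).lower()
--     device_class = str(device_info.get('device_class', '')).lower()
--     pnp_class = str(device_info.get('pnp_class', '')).lower()
--
--     # Storage devices
--     if any(x in name or x in desc for x in ['disk', 'storage', 'mass storage', 'usbstor', 'flash', 'thumb']):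
--         return 'storage'
--     if pnp_class == 'diskdrive' or device_class == 'diskdrive':
--         return 'storage'
--
--     # Input devices
--     if any(x in name or x in desc for x in ['mouse', 'keyboard', 'hid', 'input', 'touchpad', 'trackpad']):
--         return 'input'
--     if pnp_class == 'mouse' or pnp_class == 'keyboard' or pnp_class == 'hid':
--         return 'input'
--
--     # Network devices
--     if any(x in name or x in desc for x in ['network', 'ethernet', 'wifi', 'wireless', 'lan', 'wlan', 'bluetooth']):
--         return 'network'
--     if pnp_class in ['net', 'network']:
--         return 'network'
--
--     # Audio/Video
--     if any(x in name or x in desc for x in ['audio', 'sound', 'speaker', 'microphone', 'webcam', 'camera', 'video']):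
--         return 'audio_video'
--     if pnp_class in ['media', 'camera', 'sound']:
--         return 'audio_video'
--
--     # Hubs
--     if any(x in name or x in desc for x in ['hub', 'root hub', 'composite']):
--         return 'hub'
--     if pnp_class == 'usb' and 'hub' in desc:
--         return 'hub'
--
--     # Printers
--     if any(x in name or x in desc for x in ['printer', 'print']):
--         return 'printer'
--     if pnp_class == 'printer':
--         return 'printer'
--
--     # Serial/COM devices
--     if any(x in name or x in desc for x in ['serial', 'com port', 'uart']):
--         return 'serial'
--     if pnp_class == 'ports':
--         return 'serial'
--
--     # Portable devices (phones/tablets over MTP)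
--     if pnp_class == 'wpd' or 'mtp' in name or 'mtp' in desc or 'portable device' in desc:
--         return 'portable'
--
--     return 'unknown'
-- ===== SOURCE B (Python) =====
-- # B: table-driven classifier — the priority logic as an ordered list of DNF rules
-- # interpreted by one tiny loop (objective: idiomatic/data-driven; same cost).
--
-- _FIELDS = ('name', 'description', 'device_class', 'pnp_class')
--
--
-- def _kw(*words):
--     """Clauses testing each word as a substring of name or of description."""
--     out = []
--     for w in words:
--         out.append([('sub', 'name', w)])
--         out.append([('sub', 'description', w)])
--     return out
--
--
-- _RULES = [
--     ('storage', _kw('disk', 'storage', 'mass storage', 'usbstor', 'flash', 'thumb')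
--      + [[('eq', 'pnp_class', 'diskdrive')], [('eq', 'device_class', 'diskdrive')]]),
--     ('input', _kw('mouse', 'keyboard', 'hid', 'input', 'touchpad', 'trackpad')
--      + [[('eq', 'pnp_class', 'mouse')], [('eq', 'pnp_class', 'keyboard')], [('eq', 'pnp_class', 'hid')]]),
--     ('network', _kw('network', 'ethernet', 'wifi', 'wireless', 'lan', 'wlan', 'bluetooth')
--      + [[('eq', 'pnp_class', 'net')], [('eq', 'pnp_class', 'network')]]),
--     ('audio_video', _kw('audio', 'sound', 'speaker', 'microphone', 'webcam', 'camera', 'video')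
--      + [[('eq', 'pnp_class', 'media')], [('eq', 'pnp_class', 'camera')], [('eq', 'pnp_class', 'sound')]]),
--     ('hub', _kw('hub', 'root hub', 'composite')
--      + [[('eq', 'pnp_class', 'usb'), ('sub', 'description', 'hub')]]),
--     ('printer', _kw('printer', 'print') + [[('eq', 'pnp_class', 'printer')]]),
--     ('serial', _kw('serial', 'com port', 'uart') + [[('eq', 'pnp_class', 'ports')]]),
--     ('portable', [[('eq', 'pnp_class', 'wpd')], [('sub', 'name', 'mtp')],
--                   [('sub', 'description', 'mtp')], [('sub', 'description', 'portable device')]]),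
-- ]
--
--
-- def _matches(fields, clauses):
--     return any(all(v in fields[f] if op == 'sub' else fields[f] == v
--                    for op, f, v in clause)
--                for clause in clauses)
--
--
-- def classify_device_type(device_info):
--     """Classify USB device by type based on device info."""
--     fields = {f: str(device_info.get(f, '')).lower() for f in _FIELDS}
--     return next((cat for cat, clauses in _RULES if _matches(fields, clauses)), 'unknown')
-- ===== Notes on version B (the rewrite author's own statement) =====
-- stated objective: idiomatic
-- what changed: Replaces A's hand-written ladder of if/elif blocks by an ordered data table of DNF rules (substring and exact-match atoms over the four fields) interpreted by one generic matching loop; the asymmetric cases (hub's conjunction, portable's desc-only test) are encoded as their own clauses.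
import Mathlib
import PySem

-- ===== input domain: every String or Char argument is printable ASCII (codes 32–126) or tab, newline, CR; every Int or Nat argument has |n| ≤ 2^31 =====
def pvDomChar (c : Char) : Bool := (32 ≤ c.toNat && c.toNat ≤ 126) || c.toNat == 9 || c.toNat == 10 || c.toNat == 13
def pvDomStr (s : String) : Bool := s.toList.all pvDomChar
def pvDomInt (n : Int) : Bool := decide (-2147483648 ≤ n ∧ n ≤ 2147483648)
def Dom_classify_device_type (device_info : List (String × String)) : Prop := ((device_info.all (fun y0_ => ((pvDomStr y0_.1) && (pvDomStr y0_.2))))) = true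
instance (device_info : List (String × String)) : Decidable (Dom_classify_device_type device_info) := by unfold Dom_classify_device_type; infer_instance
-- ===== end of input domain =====

-- B replaces A's ladder of hand-written ifs by an ordered rule table (DNF clauses of
-- substring/equality atoms) interpreted by one loop; same behaviour, same cost.

-- ===== PORT A =====
def classify_device_type (device_info : List (String × String)) : String :=
  let name := PySem.Str.lower ((device_info.lookup "name").getD "")
  let desc := PySem.Str.lower ((device_info.lookup "description").getD "")
  let device_class := PySem.Str.lower ((device_info.lookup "device_class").getD "")
  let pnp_class := PySem.Str.lower ((device_info.lookup "pnp_class").getD "")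
  if (["disk", "storage", "mass storage", "usbstor", "flash", "thumb"].any
      (fun x => PySem.Str.isIn x name || PySem.Str.isIn x desc)) then "storage"
  else if pnp_class == "diskdrive" || device_class == "diskdrive" then "storage"
  else if (["mouse", "keyboard", "hid", "input", "touchpad", "trackpad"].any
      (fun x => PySem.Str.isIn x name || PySem.Str.isIn x desc)) then "input"
  else if pnp_class == "mouse" || pnp_class == "keyboard" || pnp_class == "hid" then "input"
  else if (["network", "ethernet", "wifi", "wireless", "lan", "wlan", "bluetooth"].any
      (fun x => PySem.Str.isIn x name || PySem.Str.isIn x desc)) then "network"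
  else if ["net", "network"].contains pnp_class then "network"
  else if (["audio", "sound", "speaker", "microphone", "webcam", "camera", "video"].any
      (fun x => PySem.Str.isIn x name || PySem.Str.isIn x desc)) then "audio_video"
  else if ["media", "camera", "sound"].contains pnp_class then "audio_video"
  else if (["hub", "root hub", "composite"].any
      (fun x => PySem.Str.isIn x name || PySem.Str.isIn x desc)) then "hub"
  else if pnp_class == "usb" && PySem.Str.isIn "hub" desc then "hub"
  else if (["printer", "print"].any
      (fun x => PySem.Str.isIn x name || PySem.Str.isIn x desc)) then "printer"
  else if pnp_class == "printer" then "printer"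
  else if (["serial", "com port", "uart"].any
      (fun x => PySem.Str.isIn x name || PySem.Str.isIn x desc)) then "serial"
  else if pnp_class == "ports" then "serial"
  else if pnp_class == "wpd" || PySem.Str.isIn "mtp" name || PySem.Str.isIn "mtp" desc
      || PySem.Str.isIn "portable device" desc then "portable"
  else "unknown"

-- ===== PORT B =====
-- atom = (op, field, value): op "sub" tests value as substring of the field, otherwise equality
def pvKw (words : List String) : List (List (String × String × String)) :=
  words.foldl (fun out w => out ++ [[("sub", "name", w)], [("sub", "description", w)]]) []

def pvRules : List (String × List (List (String × String × String))) :=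
  [("storage", pvKw ["disk", "storage", "mass storage", "usbstor", "flash", "thumb"]
      ++ [[("eq", "pnp_class", "diskdrive")], [("eq", "device_class", "diskdrive")]]),
   ("input", pvKw ["mouse", "keyboard", "hid", "input", "touchpad", "trackpad"]
      ++ [[("eq", "pnp_class", "mouse")], [("eq", "pnp_class", "keyboard")], [("eq", "pnp_class", "hid")]]),
   ("network", pvKw ["network", "ethernet", "wifi", "wireless", "lan", "wlan", "bluetooth"]
      ++ [[("eq", "pnp_class", "net")], [("eq", "pnp_class", "network")]]),
   ("audio_video", pvKw ["audio", "sound", "speaker", "microphone", "webcam", "camera", "video"]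
      ++ [[("eq", "pnp_class", "media")], [("eq", "pnp_class", "camera")], [("eq", "pnp_class", "sound")]]),
   ("hub", pvKw ["hub", "root hub", "composite"]
      ++ [[("eq", "pnp_class", "usb"), ("sub", "description", "hub")]]),
   ("printer", pvKw ["printer", "print"] ++ [[("eq", "pnp_class", "printer")]]),
   ("serial", pvKw ["serial", "com port", "uart"] ++ [[("eq", "pnp_class", "ports")]]),
   ("portable", [[("eq", "pnp_class", "wpd")], [("sub", "name", "mtp")],
      [("sub", "description", "mtp")], [("sub", "description", "portable device")]])]

def pvMatches (fields : List (String × String)) (clauses : List (List (String × String × String))) : Bool :=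
  clauses.any (fun clause => clause.all
    (fun a => if a.1 == "sub" then PySem.Str.isIn a.2.2 ((fields.lookup a.2.1).getD "")
              else (fields.lookup a.2.1).getD "" == a.2.2))

def classify_device_type_alt (device_info : List (String × String)) : String :=
  let fields := (["name", "description", "device_class", "pnp_class"]).map
    (fun f => (f, PySem.Str.lower ((device_info.lookup f).getD "")))
  ((pvRules.find? (fun r => pvMatches fields r.2)).map (fun r => r.1)).getD "unknown"

-- ===== PRECONDITION & SPEC =====
def Spec_classify_device_type (device_info : List (String × String)) (out : String) : Prop := out = classify_device_type_alt device_info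
instance (device_info : List (String × String)) (out : String) : Decidable (Spec_classify_device_type device_info out) := by unfold Spec_classify_device_type; infer_instance

-- ===== CLAIM (what is proved, stated in full; the proofs are below) =====
def Claim_equal_classify_device_type : Prop := ∀ (device_info : List (String × String)), Dom_classify_device_type device_info → Spec_classify_device_type device_info (classify_device_type device_info)

-- ===== LEMMAS AND PROOFS =====
theorem if_orb (a b : Bool) (x y : String) :
    (if a then x else if b then x else y) = if a || b then x else y := by
  cases a <;> simp

theorem find?_cons_if {α : Type} (p : α → Bool) (a : α) (l : List α) :
    List.find? p (a :: l) = if p a then some a else List.find? p l := by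
  by_cases h : p a <;> simp [h]

theorem map_ite {α β : Type} (c : Prop) [Decidable c] (a b : Option α) (f : α → β) :
    Option.map f (if c then a else b) = if c then Option.map f a else Option.map f b := by
  split_ifs <;> rfl

theorem getD_ite {α : Type} (c : Prop) [Decidable c] (a b : Option α) (d : α) :
    (if c then a else b).getD d = if c then a.getD d else b.getD d := by
  split_ifs <;> rfl

-- ===== VERDICT (by name: the statement is the Claim_ definition above) =====
set_option maxRecDepth 10000 in
theorem classify_device_type_spec : Claim_equal_classify_device_type := by
  intro di _
  unfold Spec_classify_device_type
  simp only [classify_device_type, classify_device_type_alt, pvMatches, pvRules, pvKw,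
    List.foldl_cons, List.foldl_nil, List.nil_append, List.cons_append,
    List.map_cons, List.map_nil, find?_cons_if, List.find?_nil,
    List.any_cons, List.any_nil, List.all_cons, List.all_nil,
    List.contains_cons, List.elem_nil,
    List.lookup_cons, String.reduceBEq,
    Bool.false_eq_true, if_false, if_true,
    Option.getD_some, Option.map_some, Option.map_none, Option.getD_none,
    map_ite, getD_ite, Bool.or_false, Bool.and_true, Bool.or_assoc, if_orb]
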